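-- pv_equiv track=rewrite | github.com/bgates747/AgonWolf3D | dev/deprecated/scripts/00_blend_make_polys_diag.py | reorder_vertices
-- ===== SOURCE A (Python) =====
-- def reorder_vertices(coords):
--     if not coords:
--         return []
--     # First, group by x values to separate out min and max x.
--     x_vals = [x for x, y in coords]
--     min_x, max_x = min(x_vals), max(x_vals)
--     # Separate the points based on min and max x.
--     min_x_points = [(x, y) for x, y in coords if x == min_x]
--     max_x_points = [(x, y) for x, y in coords if x == max_x]
--     # For min_x_points and max_x_points, find the points with min and max y.
--     top_left = min(min_x_points, key=lambda v: v[1])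
--     bottom_left = max(min_x_points, key=lambda v: v[1])
--     top_right = min(max_x_points, key=lambda v: v[1])
--     bottom_right = max(max_x_points, key=lambda v: v[1])
--     # Return them in the specified order.
--     return [top_left, top_right, bottom_right, bottom_left]
-- ===== SOURCE B (Python) =====
-- def reorder_vertices(coords):
--     if not coords:
--         return []
--     x0, y0 = coords[0]
--     mn = mx = x0
--     tl = bl = tr = br = (x0, y0)
--     for x, y in coords[1:]:
--         if x < mn:
--             mn = x
--             tl = bl = (x, y)
--         elif x == mn:
--             if y < tl[1]:
--                 tl = (x, y)
--             if y > bl[1]: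
--                 bl = (x, y)
--         if x > mx:
--             mx = x
--             tr = br = (x, y)
--         elif x == mx:
--             if y < tr[1]:
--                 tr = (x, y)
--             if y > br[1]:
--                 br = (x, y)
--     return [tl, tr, br, bl]
-- ===== Notes on version B (the rewrite author's own statement) =====
-- stated objective: alternative
-- what changed: Replaces A's staged passes (x-projection, min, max, two filters, four keyed min/max scans) by a single fused pass over the points that maintains both x-extremes and all four corner candidates in one accumulator.
import Mathlib
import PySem

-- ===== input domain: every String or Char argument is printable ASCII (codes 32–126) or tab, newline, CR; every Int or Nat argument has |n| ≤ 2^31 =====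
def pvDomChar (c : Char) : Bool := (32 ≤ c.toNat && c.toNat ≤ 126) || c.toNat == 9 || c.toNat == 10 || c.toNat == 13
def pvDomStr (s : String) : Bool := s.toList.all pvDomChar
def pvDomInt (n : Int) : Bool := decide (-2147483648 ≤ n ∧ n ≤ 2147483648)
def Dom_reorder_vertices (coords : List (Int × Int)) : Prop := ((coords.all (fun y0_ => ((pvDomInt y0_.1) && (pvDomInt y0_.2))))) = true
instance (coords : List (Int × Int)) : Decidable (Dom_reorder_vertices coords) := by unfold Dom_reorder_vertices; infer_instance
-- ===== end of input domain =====

-- B replaces A's staged passes (projection, min, max, two filters, four keyed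
-- min/max scans) by one fused pass maintaining all four corner candidates
-- (objective: alternative single-pass algorithm).

-- ===== PORT A =====
-- min/max raise only on the empty list, which the 'coords = []' guard excludes;
-- the 'none' match arms are unreachable totality guards.
def reorder_vertices (coords : List (Int × Int)) : List (Int × Int) :=
  if coords = [] then []
  else
    let x_vals := coords.map (fun p => p.1)
    let min_x := (PySem.List.min? x_vals (fun x => x)).getD 0
    let max_x := (PySem.List.max? x_vals (fun x => x)).getD 0
    let min_x_points := coords.filter (fun p => p.1 == min_x)
    let max_x_points := coords.filter (fun p => p.1 == max_x)
    match PySem.List.min? min_x_points (fun v => v.2), PySem.List.max? min_x_points (fun v => v.2),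
          PySem.List.min? max_x_points (fun v => v.2), PySem.List.max? max_x_points (fun v => v.2) with
    | some top_left, some bottom_left, some top_right, some bottom_right =>
        [top_left, top_right, bottom_right, bottom_left]
    | _, _, _, _ => []

-- ===== PORT B =====
-- the accumulator is a pair of triples: (mn, tl, bl) for the left edge and
-- (mx, tr, br) for the right edge, updated exactly as Source B's loop body does.
def rvStepL (s : Int × (Int × Int) × (Int × Int)) (q : Int × Int) :
    Int × (Int × Int) × (Int × Int) :=
  if q.1 < s.1 then (q.1, q, q)
  else if q.1 = s.1 then
    (s.1, (if q.2 < s.2.1.2 then q else s.2.1), (if s.2.2.2 < q.2 then q else s.2.2))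
  else s

def rvStepR (s : Int × (Int × Int) × (Int × Int)) (q : Int × Int) :
    Int × (Int × Int) × (Int × Int) :=
  if s.1 < q.1 then (q.1, q, q)
  else if q.1 = s.1 then
    (s.1, (if q.2 < s.2.1.2 then q else s.2.1), (if s.2.2.2 < q.2 then q else s.2.2))
  else s

def rvStep (s : (Int × (Int × Int) × (Int × Int)) × (Int × (Int × Int) × (Int × Int)))
    (q : Int × Int) :
    (Int × (Int × Int) × (Int × Int)) × (Int × (Int × Int) × (Int × Int)) :=
  (rvStepL s.1 q, rvStepR s.2 q)

def reorder_vertices_alt (coords : List (Int × Int)) : List (Int × Int) :=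
  match coords with
  | [] => []
  | p :: rest =>
    let s := rest.foldl rvStep ((p.1, p, p), (p.1, p, p))
    [s.1.2.1, s.2.2.1, s.2.2.2, s.1.2.2]

-- ===== PRECONDITION & SPEC =====
def Spec_reorder_vertices (coords : List (Int × Int)) (out : List (Int × Int)) : Prop := out = reorder_vertices_alt coords
instance (coords : List (Int × Int)) (out : List (Int × Int)) : Decidable (Spec_reorder_vertices coords out) := by unfold Spec_reorder_vertices; infer_instance

-- ===== CLAIM (what is proved, stated in full; the proofs are below) =====
def Claim_equal_reorder_vertices : Prop := ∀ (coords : List (Int × Int)), Dom_reorder_vertices coords → Spec_reorder_vertices coords (reorder_vertices coords)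

-- ===== LEMMAS AND PROOFS =====

-- loop invariant for the left-edge triple: after the seen points g,
-- (mn, tl, bl) hold the minimal x and the y-extremes at that x.
def InvL (g : List (Int × Int)) (s : Int × (Int × Int) × (Int × Int)) : Prop :=
  s.2.1 ∈ g ∧ s.2.2 ∈ g ∧ s.2.1.1 = s.1 ∧ s.2.2.1 = s.1 ∧
    ∀ p ∈ g, s.1 ≤ p.1 ∧ (p.1 = s.1 → s.2.1.2 ≤ p.2 ∧ p.2 ≤ s.2.2.2)

def InvR (g : List (Int × Int)) (s : Int × (Int × Int) × (Int × Int)) : Prop :=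
  s.2.1 ∈ g ∧ s.2.2 ∈ g ∧ s.2.1.1 = s.1 ∧ s.2.2.1 = s.1 ∧
    ∀ p ∈ g, p.1 ≤ s.1 ∧ (p.1 = s.1 → s.2.1.2 ≤ p.2 ∧ p.2 ≤ s.2.2.2)

theorem invL_step (g : List (Int × Int)) (s : Int × (Int × Int) × (Int × Int))
    (q : Int × Int) (h : InvL g s) : InvL (g ++ [q]) (rvStepL s q) := by
  obtain ⟨h1, h2, h3, h4, h5⟩ := h
  unfold rvStepL InvL
  split_ifs with hlt heq hy1 hy2 hy3
  all_goals refine ⟨by first | exact List.mem_append_left _ h1 | simp,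
    by first | exact List.mem_append_left _ h2 | simp, by first | (simp only []; omega) | omega | simp only [], by first | (simp only []; omega) | omega | simp only [], ?_⟩
  all_goals
    intro r hr
    rcases List.mem_append.mp hr with hr | hr
    · have h61 := (h5 r hr).1
      by_cases hrs : r.1 = s.1
      · have h7 := (h5 r hr).2 hrs
        exact ⟨by first | (simp only []; omega) | omega | simp only [], fun hre => ⟨by first | (simp only []; omega) | omega | simp only [], by first | (simp only []; omega) | omega | simp only []⟩⟩
      · exact ⟨by first | (simp only []; omega) | omega | simp only [], fun hre => ⟨by first | (simp only []; omega) | omega | simp only [], by first | (simp only []; omega) | omega | simp only []⟩⟩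
    · simp only [List.mem_singleton] at hr
      subst hr
      exact ⟨by first | (simp only []; omega) | omega | simp only [], fun hre => ⟨by first | (simp only []; omega) | omega | simp only [], by first | (simp only []; omega) | omega | simp only []⟩⟩

theorem invR_step (g : List (Int × Int)) (s : Int × (Int × Int) × (Int × Int))
    (q : Int × Int) (h : InvR g s) : InvR (g ++ [q]) (rvStepR s q) := by
  obtain ⟨h1, h2, h3, h4, h5⟩ := h
  unfold rvStepR InvR
  split_ifs with hlt heq hy1 hy2 hy3
  all_goals refine ⟨by first | exact List.mem_append_left _ h1 | simp,
    by first | exact List.mem_append_left _ h2 | simp, by first | (simp only []; omega) | omega | simp only [], by first | (simp only []; omega) | omega | simp only [], ?_⟩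
  all_goals
    intro r hr
    rcases List.mem_append.mp hr with hr | hr
    · have h61 := (h5 r hr).1
      by_cases hrs : r.1 = s.1
      · have h7 := (h5 r hr).2 hrs
        exact ⟨by first | (simp only []; omega) | omega | simp only [], fun hre => ⟨by first | (simp only []; omega) | omega | simp only [], by first | (simp only []; omega) | omega | simp only []⟩⟩
      · exact ⟨by first | (simp only []; omega) | omega | simp only [], fun hre => ⟨by first | (simp only []; omega) | omega | simp only [], by first | (simp only []; omega) | omega | simp only []⟩⟩
    · simp only [List.mem_singleton] at hr
      subst hr
      exact ⟨by first | (simp only []; omega) | omega | simp only [], fun hre => ⟨by first | (simp only []; omega) | omega | simp only [], by first | (simp only []; omega) | omega | simp only []⟩⟩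

theorem inv_foldl (l g : List (Int × Int))
    (s : (Int × (Int × Int) × (Int × Int)) × (Int × (Int × Int) × (Int × Int)))
    (hL : InvL g s.1) (hR : InvR g s.2) :
    InvL (g ++ l) (l.foldl rvStep s).1 ∧ InvR (g ++ l) (l.foldl rvStep s).2 := by
  induction l generalizing g s with
  | nil => simpa using ⟨hL, hR⟩
  | cons q t ih =>
    have h := ih (g ++ [q]) (rvStep s q) (invL_step g s.1 q hL) (invR_step g s.2 q hR)
    simpa [List.append_assoc] using h

-- fst of a member is a member of the x-projection
theorem mem_map_fst {p : Int × Int} {g : List (Int × Int)} (h : p ∈ g) :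
    p.1 ∈ g.map (fun r => r.1) := List.mem_map.mpr ⟨p, h, rfl⟩

theorem reorder_eq (coords : List (Int × Int)) :
    reorder_vertices coords = reorder_vertices_alt coords := by
  match coords with
  | [] => rfl
  | p :: rest =>
    -- the fold state and its invariant over the whole list
    have hL0 : InvL [p] (p.1, p, p) := by
      refine ⟨by simp, by simp, rfl, rfl, ?_⟩
      intro q hq; simp at hq; subst hq; exact ⟨le_refl _, fun _ => ⟨le_refl _, le_refl _⟩⟩
    have hR0 : InvR [p] (p.1, p, p) := by
      refine ⟨by simp, by simp, rfl, rfl, ?_⟩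
      intro q hq; simp at hq; subst hq; exact ⟨le_refl _, fun _ => ⟨le_refl _, le_refl _⟩⟩
    obtain ⟨hL, hR⟩ := inv_foldl rest [p] ((p.1, p, p), (p.1, p, p)) hL0 hR0
    rw [show [p] ++ rest = p :: rest from rfl] at hL hR
    generalize hfold : List.foldl rvStep ((p.1, p, p), (p.1, p, p)) rest = s at hL hR
    obtain ⟨htl, hbl, htl1, hbl1, hmin⟩ := hL
    obtain ⟨htr, hbr, htr1, hbr1, hmax⟩ := hR
    -- A side: the min/max on the nonempty list succeed
    have hne : (p :: rest) ≠ [] := by simp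
    have hmapne : (p :: rest).map (fun r => r.1) ≠ [] := by simp
    obtain ⟨mn, hmn⟩ : ∃ m, PySem.List.min? ((p :: rest).map (fun r => r.1)) (fun x => x) = some m := by
      cases hx : PySem.List.min? ((p :: rest).map (fun r => r.1)) (fun x => x) with
      | none => exact absurd ((PySem.List.min?_eq_none_iff _ _).mp hx) hmapne
      | some m => exact ⟨m, rfl⟩
    obtain ⟨mx, hmx⟩ : ∃ m, PySem.List.max? ((p :: rest).map (fun r => r.1)) (fun x => x) = some m := by
      cases hx : PySem.List.max? ((p :: rest).map (fun r => r.1)) (fun x => x) with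
      | none => exact absurd ((PySem.List.max?_eq_none_iff _ _).mp hx) hmapne
      | some m => exact ⟨m, rfl⟩
    -- the fold's extremes equal A's min_x / max_x
    have hmn_eq : mn = s.1.1 := by
      have h1 : mn ≤ s.1.1 := by
        have := PySem.List.min?_isMin hmn s.1.2.1.1 (htl1 ▸ mem_map_fst htl)
        simpa using htl1 ▸ this
      have h2 : s.1.1 ≤ mn := by
        obtain ⟨q, hq, hq1⟩ := List.mem_map.mp (PySem.List.min?_mem hmn)
        exact hq1 ▸ (hmin q hq).1
      omega
    have hmx_eq : mx = s.2.1 := by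
      have h1 : s.2.1 ≤ mx := by
        have := PySem.List.max?_isMax hmx s.2.2.1.1 (htr1 ▸ mem_map_fst htr)
        simpa using htr1 ▸ this
      have h2 : mx ≤ s.2.1 := by
        obtain ⟨q, hq, hq1⟩ := List.mem_map.mp (PySem.List.max?_mem hmx)
        exact hq1 ▸ (hmax q hq).1
      omega
    -- A's four corner scans succeed and return the fold's candidates
    have hfLne : (p :: rest).filter (fun r => r.1 == mn) ≠ [] := by
      intro hnil
      have : s.1.2.1 ∈ (p :: rest).filter (fun r => r.1 == mn) :=
        List.mem_filter.mpr ⟨htl, by simp [htl1, hmn_eq]⟩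
      simp [hnil] at this
    have hfRne : (p :: rest).filter (fun r => r.1 == mx) ≠ [] := by
      intro hnil
      have : s.2.2.1 ∈ (p :: rest).filter (fun r => r.1 == mx) :=
        List.mem_filter.mpr ⟨htr, by simp [htr1, hmx_eq]⟩
      simp [hnil] at this
    obtain ⟨tlA, htlA⟩ : ∃ v, PySem.List.min? ((p :: rest).filter (fun r => r.1 == mn)) (fun v => v.2) = some v := by
      cases hx : PySem.List.min? ((p :: rest).filter (fun r => r.1 == mn)) (fun v => v.2) with
      | none => exact absurd ((PySem.List.min?_eq_none_iff _ _).mp hx) hfLne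
      | some v => exact ⟨v, rfl⟩
    obtain ⟨blA, hblA⟩ : ∃ v, PySem.List.max? ((p :: rest).filter (fun r => r.1 == mn)) (fun v => v.2) = some v := by
      cases hx : PySem.List.max? ((p :: rest).filter (fun r => r.1 == mn)) (fun v => v.2) with
      | none => exact absurd ((PySem.List.max?_eq_none_iff _ _).mp hx) hfLne
      | some v => exact ⟨v, rfl⟩
    obtain ⟨trA, htrA⟩ : ∃ v, PySem.List.min? ((p :: rest).filter (fun r => r.1 == mx)) (fun v => v.2) = some v := by
      cases hx : PySem.List.min? ((p :: rest).filter (fun r => r.1 == mx)) (fun v => v.2) with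
      | none => exact absurd ((PySem.List.min?_eq_none_iff _ _).mp hx) hfRne
      | some v => exact ⟨v, rfl⟩
    obtain ⟨brA, hbrA⟩ : ∃ v, PySem.List.max? ((p :: rest).filter (fun r => r.1 == mx)) (fun v => v.2) = some v := by
      cases hx : PySem.List.max? ((p :: rest).filter (fun r => r.1 == mx)) (fun v => v.2) with
      | none => exact absurd ((PySem.List.max?_eq_none_iff _ _).mp hx) hfRne
      | some v => exact ⟨v, rfl⟩
    -- uniqueness: each A-corner equals the corresponding fold candidate
    have htlA_mem := List.mem_filter.mp (PySem.List.min?_mem htlA)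
    have hblA_mem := List.mem_filter.mp (PySem.List.max?_mem hblA)
    have htrA_mem := List.mem_filter.mp (PySem.List.min?_mem htrA)
    have hbrA_mem := List.mem_filter.mp (PySem.List.max?_mem hbrA)
    have htlA1 : tlA.1 = mn := by simpa using htlA_mem.2
    have hblA1 : blA.1 = mn := by simpa using hblA_mem.2
    have htrA1 : trA.1 = mx := by simpa using htrA_mem.2
    have hbrA1 : brA.1 = mx := by simpa using hbrA_mem.2
    have htl_in_f : s.1.2.1 ∈ (p :: rest).filter (fun r => r.1 == mn) :=
      List.mem_filter.mpr ⟨htl, by simp [htl1, hmn_eq]⟩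
    have hbl_in_f : s.1.2.2 ∈ (p :: rest).filter (fun r => r.1 == mn) :=
      List.mem_filter.mpr ⟨hbl, by simp [hbl1, hmn_eq]⟩
    have htr_in_f : s.2.2.1 ∈ (p :: rest).filter (fun r => r.1 == mx) :=
      List.mem_filter.mpr ⟨htr, by simp [htr1, hmx_eq]⟩
    have hbr_in_f : s.2.2.2 ∈ (p :: rest).filter (fun r => r.1 == mx) :=
      List.mem_filter.mpr ⟨hbr, by simp [hbr1, hmx_eq]⟩
    have etl : tlA = s.1.2.1 := by
      have h1 : tlA.2 ≤ s.1.2.1.2 := PySem.List.min?_isMin htlA _ htl_in_f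
      have h2 : s.1.2.1.2 ≤ tlA.2 := ((hmin tlA htlA_mem.1).2 (by omega)).1
      exact Prod.ext (by omega) (le_antisymm h1 h2)
    have ebl : blA = s.1.2.2 := by
      have h1 : s.1.2.2.2 ≤ blA.2 := PySem.List.max?_isMax hblA _ hbl_in_f
      have h2 : blA.2 ≤ s.1.2.2.2 := ((hmin blA hblA_mem.1).2 (by omega)).2
      exact Prod.ext (by omega) (le_antisymm h2 h1)
    have etr : trA = s.2.2.1 := by
      have h1 : trA.2 ≤ s.2.2.1.2 := PySem.List.min?_isMin htrA _ htr_in_f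
      have h2 : s.2.2.1.2 ≤ trA.2 := ((hmax trA htrA_mem.1).2 (by omega)).1
      exact Prod.ext (by omega) (le_antisymm h1 h2)
    have ebr : brA = s.2.2.2 := by
      have h1 : s.2.2.2.2 ≤ brA.2 := PySem.List.max?_isMax hbrA _ hbr_in_f
      have h2 : brA.2 ≤ s.2.2.2.2 := ((hmax brA hbrA_mem.1).2 (by omega)).2
      exact Prod.ext (by omega) (le_antisymm h2 h1)
    -- assemble both sides
    simp only [reorder_vertices, reorder_vertices_alt, if_neg hne, hmn, hmx,
      Option.getD_some, htlA, hblA, htrA, hbrA, etl, ebl, etr, ebr, hfold]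

-- ===== VERDICT (by name: the statement is the Claim_ definition above) =====
theorem reorder_vertices_spec : Claim_equal_reorder_vertices := by
  intro coords _
  exact reorder_eq coords
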